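-- pv_equiv track=rewrite | github.com/xwoud/Algorithm | programmers/2개이하로다른비트.py | solution
-- ===== SOURCE A (Python) =====
-- def solution(numbers):
--     answer = []
--
--     for number in numbers:
--         if number % 2 == 0:
--             answer.append(number + 1)
--         else:
--             bin_number = format(number, "b")
--             point = bin_number.rfind("01")
--             if point == -1:
--                 bin_number = "10" + bin_number[1:]
--                 answer.append(int(bin_number, 2))
--             else:
--                 bin_number = bin_number[:point] + "10" + bin_number[point + 2:]
--                 answer.append(int(bin_number, 2))
--
--     return answer
-- ===== SOURCE B (Python) =====
-- def _next(n):
--     if n % 2 == 0: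
--         return n + 1
--     # n is odd: the rightmost 0 bit sits just above the p trailing 1 bits;
--     # moving that 0 one place right is the same as adding 2**(p-1).
--     x, p = n, 0
--     while x % 2 == 1:
--         x //= 2
--         p += 1
--     return n + (1 << (p - 1))
--
--
-- def solution(numbers):
--     return [_next(n) for n in numbers]
-- ===== Notes on version B (the rewrite author's own statement) =====
-- stated objective: alternative
-- what changed: The odd branch no longer formats the number as a binary string, searches it with rfind('01'), splices slices and re-parses with int(.,2); it counts the trailing 1 bits p by integer halving and adds 2**(p-1), and the result list is built by a comprehension over a helper instead of a fold with appends.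
-- outside the precondition, e.g. on solution([-5]): A returns [-6], B returns [-3]; on solution([-1]): A returns [5], B does not finish within the time limit
import Mathlib
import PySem

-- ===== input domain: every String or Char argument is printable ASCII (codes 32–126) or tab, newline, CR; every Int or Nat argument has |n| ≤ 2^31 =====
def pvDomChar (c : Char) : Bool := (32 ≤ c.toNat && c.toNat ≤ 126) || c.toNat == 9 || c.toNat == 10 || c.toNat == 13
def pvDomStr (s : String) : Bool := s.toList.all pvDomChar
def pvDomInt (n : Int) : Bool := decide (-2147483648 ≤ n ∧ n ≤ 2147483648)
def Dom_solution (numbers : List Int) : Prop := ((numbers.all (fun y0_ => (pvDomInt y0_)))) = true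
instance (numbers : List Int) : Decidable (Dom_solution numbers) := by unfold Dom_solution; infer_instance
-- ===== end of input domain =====

-- B replaces A's binary-string rfind('01')/slice/int(.,2) odd-branch with integer
-- arithmetic (count trailing one bits, add 2^(p-1)) and builds the list with map.


-- ===== PORT A =====
-- hand port of bin_number.rfind("01"): index of the LAST occurrence of "01" (none = -1);
-- exact for every List Char
def rfind01 : List Char → Option Nat
  | [] => none
  | c :: rest =>
    match rfind01 rest with
    | some j => some (j + 1)
    | none => if c = '0' ∧ rest.head? = some '1' then some 0 else none

def bitVal (c : Char) : Int := if c = '1' then 1 else 0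

def parseBits (cs : List Char) : Int := cs.foldl (fun a c => 2 * a + bitVal c) 0

-- hand port of int(s, 2), exact on the strings this program constructs:
-- an optional leading '-' followed by a non-empty run of '0'/'1' (no spaces,
-- no '0b' prefix, no underscores)
def parseBin (cs : List Char) : Int :=
  if cs.head? = some '-' then -(parseBits cs.tail) else parseBits cs

def fA (number : Int) : Int :=
  if PySem.Int.mod number 2 = 0 then number + 1
  else
    let bin := PySem.Int.toBinChars number      -- format(number, "b")
    match rfind01 bin with                      -- point == -1 ↔ none
    | none => parseBin ('1' :: '0' :: bin.drop 1)                       -- "10" + bin[1:]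
    | some p => parseBin (bin.take p ++ '1' :: '0' :: bin.drop (p + 2)) -- bin[:p]+"10"+bin[p+2:]

def solution (numbers : List Int) : List Int :=
  numbers.foldl (fun answer number => answer ++ [fA number]) []

-- ===== PORT B =====
-- the while loop of _next; the 'x ≠ -1' guard only makes the recursion total:
-- Python's loop never terminates at x = -1 (Pre_ keeps such inputs out)
def trailOnes (x : Int) : Nat :=
  if PySem.Int.mod x 2 = 1 ∧ x ≠ -1 then trailOnes (PySem.Int.floordiv x 2) + 1 else 0
termination_by x.natAbs
decreasing_by
  rename_i h
  rw [PySem.Int.floordiv_eq_ediv_of_pos (by omega)]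
  have := PySem.Int.mod_eq_emod_of_pos (a := x) (b := 2) (by omega)
  omega

def nextVal (n : Int) : Int :=
  if PySem.Int.mod n 2 = 0 then n + 1
  else n + ((1 : Int) <<< (trailOnes n - 1))

def solution_alt (numbers : List Int) : List Int := numbers.map nextVal

-- ===== PRECONDITION & SPEC =====
-- Pre_ excludes lists containing a negative odd number: there Python A formats the
-- sign as a '-' character inside the binary string and slices through it (a value
-- that is an artefact of string formatting, meaningless for this bit puzzle), while
-- B's halving loop either diverges (-1) or returns the two's-complement answer.
def Pre_solution (numbers : List Int) : Prop :=
  ∀ n ∈ numbers, PySem.Int.mod n 2 = 1 → 0 ≤ n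
instance (numbers : List Int) : Decidable (Pre_solution numbers) := by
  unfold Pre_solution; infer_instance

def pvWitness_solution : List Int := [2, 7, 1, 12, 5]

def Spec_solution (numbers : List Int) (out : List Int) : Prop := out = solution_alt numbers
instance (numbers : List Int) (out : List Int) : Decidable (Spec_solution numbers out) := by unfold Spec_solution; infer_instance

-- ===== CLAIM (what is proved, stated in full; the proofs are below) =====
def Claim_equal_solution : Prop := ∀ (numbers : List Int), Dom_solution numbers → Pre_solution numbers → Spec_solution numbers (solution numbers)

-- ===== LEMMAS AND PROOFS =====

-- binary digits of a positive number, MSB first (no leading zeros; goBin 0 = [])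
def goBin : Nat → List Char
  | 0 => []
  | n + 1 => goBin ((n + 1) / 2) ++ [if (n + 1) % 2 = 1 then '1' else '0']
decreasing_by omega

-- Nat.toDigits 2 (including the "0" special case)
def gb (n : Nat) : List Char := if n = 0 then ['0'] else goBin n

-- trailing one bits of a natural number
def trail (n : Nat) : Nat := if n % 2 = 1 then trail (n / 2) + 1 else 0
decreasing_by omega

-- the odd branch of fA on a positive number, over goBin
def AoddRes (m : Nat) : Int :=
  match rfind01 (goBin m) with
  | none => parseBits ('1' :: '0' :: (goBin m).drop 1)
  | some p => parseBits ((goBin m).take p ++ '1' :: '0' :: (goBin m).drop (p + 2))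

lemma goBin_succ (m : Nat) (h : 1 ≤ m) :
    goBin m = goBin (m / 2) ++ [if m % 2 = 1 then '1' else '0'] := by
  cases m with
  | zero => omega
  | succ k => simp [goBin]

lemma goBin_ne_nil (m : Nat) (h : 1 ≤ m) : goBin m ≠ [] := by
  rw [goBin_succ m h]; simp

lemma head?_goBin (m : Nat) (h : 1 ≤ m) : (goBin m).head? = some '1' := by
  induction m using Nat.strong_induction_on with
  | _ m ih =>
    rw [goBin_succ m h]
    by_cases h2 : m / 2 = 0
    · have : m = 1 := by omega
      subst this; simp [goBin]
    · have ihm := ih (m / 2) (by omega) (by omega)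
      cases hg : goBin (m / 2) with
      | nil => exact absurd hg (goBin_ne_nil _ (by omega))
      | cons a t =>
        rw [hg] at ihm
        simpa using ihm

lemma getLast?_goBin (m : Nat) (h : 1 ≤ m) :
    (goBin m).getLast? = some (if m % 2 = 1 then '1' else '0') := by
  rw [goBin_succ m h]; simp

lemma parseBits_concat (xs : List Char) (c : Char) :
    parseBits (xs ++ [c]) = 2 * parseBits xs + bitVal c := by
  simp [parseBits]

lemma parse_goBin (m : Nat) : parseBits (goBin m) = (m : Int) := by
  induction m using Nat.strong_induction_on with
  | _ m ih =>
    cases m with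
    | zero => simp [goBin, parseBits]
    | succ k =>
      rw [goBin_succ (k + 1) (by omega), parseBits_concat,
        ih ((k + 1) / 2) (by omega)]
      by_cases h : (k + 1) % 2 = 1 <;> simp [h, bitVal] <;> omega

lemma rfind01_cons (c : Char) (rest : List Char) :
    rfind01 (c :: rest) = match rfind01 rest with
      | some j => some (j + 1)
      | none => if c = '0' ∧ rest.head? = some '1' then some 0 else none := rfl

lemma rfind01_some_bound (xs : List Char) (p : Nat) (h : rfind01 xs = some p) :
    p + 2 ≤ xs.length := by
  induction xs generalizing p with
  | nil => simp [rfind01] at h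
  | cons c rest ih =>
    rw [rfind01_cons] at h
    cases hr : rfind01 rest with
    | some j =>
      rw [hr] at h
      have hpj : j + 1 = p := Option.some.inj h
      have hj := ih j hr
      simp only [List.length_cons]
      omega
    | none =>
      rw [hr] at h
      by_cases hc : c = '0' ∧ rest.head? = some '1'
      · rw [if_pos hc] at h
        simp only [Option.some.injEq] at h
        obtain ⟨-, h1⟩ := hc
        cases rest with
        | nil => simp at h1
        | cons d t => simp [← h]
      · rw [if_neg hc] at h
        simp at h

lemma rfind01_concat01 (xs : List Char) :
    rfind01 (xs ++ ['0', '1']) = some xs.length := by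
  induction xs with
  | nil => simp [rfind01]
  | cons c rest ih => simp [rfind01, ih]

lemma rfind01_concat_one (xs : List Char) (h : xs.getLast? = some '1') :
    rfind01 (xs ++ ['1']) = rfind01 xs := by
  induction xs with
  | nil => simp at h
  | cons c rest ih =>
    cases rest with
    | nil =>
      simp at h
      simp [rfind01, h]
    | cons d t =>
      rw [List.getLast?_cons_cons] at h
      have ih' := ih h
      rw [show (c :: d :: t) ++ ['1'] = c :: ((d :: t) ++ ['1']) by simp,
        rfind01_cons, rfind01_cons c (d :: t), ih']
      cases hr : rfind01 (d :: t) with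
      | some j => rfl
      | none => simp

lemma trail_eq (n : Nat) : trail n = if n % 2 = 1 then trail (n / 2) + 1 else 0 := by
  rw [trail]

lemma trail_pos (n : Nat) (h : n % 2 = 1) : 1 ≤ trail n := by
  rw [trail_eq, if_pos h]; omega

-- the heart: A's odd branch computes n + 2^(trailing ones - 1)
lemma length_goBin_pos (m : Nat) (h : 1 ≤ m) : 1 ≤ (goBin m).length := by
  have hne := goBin_ne_nil m h
  cases hg : goBin m with
  | nil => exact absurd hg hne
  | cons a t => simp

-- the heart: A's odd branch computes n + 2^(trailing ones - 1)
lemma AoddRes_eq (m : Nat) (hodd : m % 2 = 1) :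
    AoddRes m = (m : Int) + 2 ^ (trail m - 1) := by
  induction m using Nat.strong_induction_on with
  | _ m ih =>
    have hm1 : 1 ≤ m := by omega
    by_cases hone : m = 1
    · subst hone
      simp [AoddRes, goBin, rfind01, parseBits, bitVal, trail_eq]
    · -- m = 2k+1, k ≥ 1
      set k := m / 2 with hk
      have hk1 : 1 ≤ k := by omega
      have hms : goBin m = goBin k ++ ['1'] := by
        rw [goBin_succ m hm1, if_pos hodd]
      have htm : trail m = trail k + 1 := by
        rw [trail_eq, if_pos hodd]
      have hklen := length_goBin_pos k hk1
      by_cases hke : k % 2 = 1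
      · -- k odd: last char of goBin k is '1'; the modification happens inside goBin k
        have hlast : (goBin k).getLast? = some '1' := by
          rw [getLast?_goBin k hk1, if_pos hke]
        have hrf : rfind01 (goBin m) = rfind01 (goBin k) := by
          rw [hms]; exact rfind01_concat_one _ hlast
        have ihk := ih k (by omega) hke
        have htk := trail_pos k hke
        have key : AoddRes m = 2 * AoddRes k + 1 := by
          cases hr : rfind01 (goBin k) with
          | none =>
            have hAm : AoddRes m = parseBits ('1' :: '0' :: (goBin m).drop 1) := by
              unfold AoddRes; rw [hrf, hr]
            have hAk : AoddRes k = parseBits ('1' :: '0' :: (goBin k).drop 1) := by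
              unfold AoddRes; rw [hr]
            rw [hAm, hAk, hms, List.drop_append_of_le_length hklen,
              show '1' :: '0' :: ((goBin k).drop 1 ++ ['1'])
                  = ('1' :: '0' :: (goBin k).drop 1) ++ ['1'] by simp,
              parseBits_concat]
            simp [bitVal]
          | some p =>
            have hb := rfind01_some_bound _ _ hr
            have hAm : AoddRes m
                = parseBits ((goBin m).take p ++ '1' :: '0' :: (goBin m).drop (p + 2)) := by
              unfold AoddRes; rw [hrf, hr]
            have hAk : AoddRes k
                = parseBits ((goBin k).take p ++ '1' :: '0' :: (goBin k).drop (p + 2)) := by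
              unfold AoddRes; rw [hr]
            rw [hAm, hAk, hms, List.take_append_of_le_length (by omega),
              List.drop_append_of_le_length (by omega),
              show (goBin k).take p ++ '1' :: '0' :: ((goBin k).drop (p + 2) ++ ['1'])
                  = ((goBin k).take p ++ '1' :: '0' :: (goBin k).drop (p + 2)) ++ ['1'] by simp,
              parseBits_concat]
            simp [bitVal]
        rw [key, ihk, htm]
        have hmk : (m : Int) = 2 * (k : Int) + 1 := by omega
        have hpow : (2 : Int) ^ (trail k - 1) * 2 = 2 ^ trail k := by
          rw [← pow_succ]
          congr 1
          omega
        rw [hmk, show trail k + 1 - 1 = trail k from rfl]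
        rw [← hpow]
        ring
      · -- k even: the last "01" straddles the boundary; result is m + 1
        have hk2 : 2 ≤ k := by omega
        set j := k / 2 with hj
        have hks : goBin k = goBin j ++ ['0'] := by
          rw [goBin_succ k hk1, if_neg (by omega)]
        have hs : goBin m = goBin j ++ ['0', '1'] := by
          rw [hms, hks]; simp
        have hrf : rfind01 (goBin m) = some (goBin j).length := by
          rw [hs]; exact rfind01_concat01 _
        have key : AoddRes m = 4 * (j : Int) + 2 := by
          have hAm : AoddRes m = parseBits ((goBin m).take (goBin j).length
              ++ '1' :: '0' :: (goBin m).drop ((goBin j).length + 2)) := by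
            unfold AoddRes; rw [hrf]
          rw [hAm, hs]
          have htake : (goBin j ++ ['0', '1']).take (goBin j).length = goBin j := by
            simp
          have hdrop : (goBin j ++ ['0', '1']).drop ((goBin j).length + 2) = [] := by
            apply List.drop_eq_nil_of_le
            simp
          rw [htake, hdrop, show goBin j ++ ['1', '0'] = (goBin j ++ ['1']) ++ ['0'] by simp,
            parseBits_concat, parseBits_concat, parse_goBin]
          simp [bitVal]
          ring
        have htk : trail k = 0 := by rw [trail_eq, if_neg (by omega)]
        rw [key, htm, htk]
        have : (m : Int) = 4 * (j : Int) + 1 := by omega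
        rw [this]; ring

lemma trailOnes_natCast (m : Nat) : trailOnes (m : Int) = trail m := by
  induction m using Nat.strong_induction_on with
  | _ m ih =>
    rw [trailOnes, trail_eq,
      PySem.Int.mod_eq_emod_of_pos (by omega), PySem.Int.floordiv_eq_ediv_of_pos (by omega)]
    by_cases h : m % 2 = 1
    · rw [if_pos ⟨by omega, by omega⟩, if_pos h]
      have he : ((m : Int)) / 2 = ((m / 2 : Nat) : Int) := by omega
      rw [he, ih (m / 2) (by omega)]
    · rw [if_neg (by omega), if_neg h]

-- Nat.toDigitsCore with enough fuel produces gb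
lemma toDigitsCore_eq_gb (fuel n : Nat) (ds : List Char) (h : n < fuel) :
    Nat.toDigitsCore 2 fuel n ds = gb n ++ ds := by
  induction fuel generalizing n ds with
  | zero => omega
  | succ f ih =>
    rw [Nat.toDigitsCore]
    by_cases h0 : n / 2 = 0
    · rw [if_pos h0]
      rcases (show n = 0 ∨ n = 1 by omega) with rfl | rfl <;> simp [gb, goBin, Nat.digitChar]
    · rw [if_neg h0, ih (n / 2) _ (by omega)]
      have hn2 : 2 ≤ n := by omega
      unfold gb
      rw [if_neg (by omega), if_neg (by omega), goBin_succ n (by omega)]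
      have : Nat.digitChar (n % 2) = if n % 2 = 1 then '1' else '0' := by
        rcases Nat.mod_two_eq_zero_or_one n with h | h <;> simp [h, Nat.digitChar]
      rw [this]
      simp

lemma toDigits_two_eq_gb (n : Nat) : Nat.toDigits 2 n = gb n := by
  rw [Nat.toDigits]
  simpa using toDigitsCore_eq_gb (n + 1) n [] (by omega)

-- per-element agreement on Pre_'s elements
lemma fA_eq_nextVal (n : Int) (hpre : PySem.Int.mod n 2 = 1 → 0 ≤ n) :
    fA n = nextVal n := by
  by_cases he : PySem.Int.mod n 2 = 0
  · simp only [fA, nextVal]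
    rw [if_pos he, if_pos he]
  · have h1 : PySem.Int.mod n 2 = 1 := by
      have h0 := PySem.Int.mod_nonneg (a := n) (b := 2) (by omega)
      have h2 := PySem.Int.mod_lt (a := n) (b := 2) (by omega)
      omega
    have hn0 : 0 ≤ n := hpre h1
    obtain ⟨m, rfl⟩ : ∃ m : Nat, n = (m : Int) := ⟨n.toNat, by omega⟩
    have hmodd : m % 2 = 1 := by
      rw [PySem.Int.mod_eq_emod_of_pos (by omega)] at h1
      omega
    have hm1 : 1 ≤ m := by
      rcases Nat.eq_zero_or_pos m with h | h
      · subst h; simp at hmodd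
      · exact h
    -- A's side: format(n,'b') = goBin m, then the odd branch is AoddRes m
    have hbin : PySem.Int.toBinChars (m : Int) = goBin m := by
      rw [PySem.Int.toBinChars]
      rw [if_neg (by omega)]
      simp only [Int.toNat_natCast]
      rw [toDigits_two_eq_gb]
      unfold gb
      rw [if_neg (by omega)]
    have hA : fA (m : Int) = AoddRes m := by
      unfold fA AoddRes
      rw [if_neg he, hbin]
      have hhead : ∀ p : Nat,
          ((goBin m).take p ++ '1' :: '0' :: (goBin m).drop (p + 2)).head? ≠ some '-' := by
        intro p
        cases p with
        | zero => simp
        | succ q =>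
          have hh := head?_goBin m hm1
          cases hg : goBin m with
          | nil => rw [hg] at hh; simp at hh
          | cons a t =>
            rw [hg] at hh
            simp only [List.head?_cons, Option.some.injEq] at hh
            subst hh
            simp
      cases hr : rfind01 (goBin m) with
      | none =>
        simp only [hr, parseBin]
        rw [if_neg (by simp)]
      | some p =>
        simp only [hr, parseBin]
        rw [if_neg (hhead p)]
    rw [hA, AoddRes_eq m hmodd]
    unfold nextVal
    rw [if_neg he, trailOnes_natCast]
    congr 1
    rw [Int.shiftLeft_eq]
    ring
  
-- solution is the fold-with-append form of map fA
lemma solution_foldl (xs : List Int) (acc : List Int) :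
    xs.foldl (fun answer number => answer ++ [fA number]) acc = acc ++ xs.map fA := by
  induction xs generalizing acc with
  | nil => simp
  | cons x t ih => simp [ih]

-- ===== VERDICT (by name: the statement is the Claim_ definition above) =====
theorem solution_spec : Claim_equal_solution := by
  intro numbers _ hpre
  unfold Spec_solution solution solution_alt
  rw [solution_foldl numbers []]
  simp only [List.nil_append]
  exact List.map_congr_left fun n hn => fA_eq_nextVal n (hpre n hn)
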